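-- pv_equiv track=rewrite | github.com/azizrosyid/codewars | Spinning Rings/main.py | spinning_rings
-- ===== SOURCE A (Python) =====
-- def spinning_rings(inner_max, outer_max):
--     inner = 0
--     outer = 0
--     action = 0
--     while True:
--         inner = decrementStay(inner, 0, inner_max)
--         outer = incrementStay(outer, 0, outer_max)
--         action +=1
--         if inner == outer:
--             break
--     return action
--
-- def decrementStay(now, min, max):
--     return now - 1 if now -1 >= min else max
--
-- def incrementStay(now, min, max):
--     return now + 1 if now + 1 <= max else min
-- ===== SOURCE B (Python) =====
-- def spinning_rings(inner_max, outer_max):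
--     # After t steps the inner ring sits at (-t) mod M and the outer at t mod N.
--     # For each candidate meeting position v solve the pair of congruences
--     #   t = -v (mod M),  t = v (mod N)
--     # by CRT and take the smallest positive solution over all v.
--     M = inner_max + 1
--     N = outer_max + 1
--     g, x, _ = _egcd(M, N)
--     L = (M // g) * N
--     best = L  # v = 0: t = 0 (mod M) and (mod N), least positive solution is L
--     for v in range(1, min(M, N)):
--         if (2 * v) % g == 0:
--             k = ((2 * v // g) * x) % (N // g)
--             t = (M * k - v) % L
--             best = min(best, t if t else L)
--     return best
--
-- def _egcd(a, b):
--     # returns (g, x, y) with a*x + b*y = g = gcd(a, b) (for a, b >= 0)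
--     if b == 0:
--         return (a, 1, 0)
--     g, x, y = _egcd(b, a % b)
--     return (g, y, x - (a // b) * y)
-- ===== Notes on version B (the rewrite author's own statement) =====
-- stated objective: alternative
-- what changed: Replaces A's step-by-step simulation of the two counter-rotating rings by number theory (for each candidate meeting position v, solve t ≡ -v mod inner period and t ≡ v mod outer period via extended Euclid/CRT and take the least positive solution); Pre_ restricts to the natural domain of nonnegative ring maxima: A diverges when inner_max < 0, and for outer_max < 0 (a nonsensical negative ring size) A's value is an accident of its frozen outer ring.
-- outside the precondition, e.g. on spinning_rings(2, -3): A returns 3, B returns 6; on spinning_rings(-2, 3): A does not finish within the time limit, B returns -4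
import Mathlib
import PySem

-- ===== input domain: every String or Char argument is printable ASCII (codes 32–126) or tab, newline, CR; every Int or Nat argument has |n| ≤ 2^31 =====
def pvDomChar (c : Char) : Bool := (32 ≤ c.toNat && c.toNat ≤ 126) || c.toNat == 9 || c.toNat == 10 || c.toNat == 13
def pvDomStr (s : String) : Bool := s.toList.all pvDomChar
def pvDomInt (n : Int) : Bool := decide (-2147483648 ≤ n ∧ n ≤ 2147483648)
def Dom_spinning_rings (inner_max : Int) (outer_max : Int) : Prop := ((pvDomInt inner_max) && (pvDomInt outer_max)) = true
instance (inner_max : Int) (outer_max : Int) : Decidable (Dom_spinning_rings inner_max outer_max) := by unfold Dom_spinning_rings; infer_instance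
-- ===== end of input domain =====

-- B replaces A's step-by-step simulation of the two rings by CRT: for each candidate
-- meeting position v it solves t ≡ -v (mod inner period), t ≡ v (mod outer period)
-- by the extended Euclidean algorithm and takes the least positive solution over all v
-- (objective: alternative algorithm, number theory instead of simulation).

-- ===== PORT A =====
def decrementStay (now mn mx : Int) : Int := if now - 1 ≥ mn then now - 1 else mx

def incrementStay (now mn mx : Int) : Int := if now + 1 ≤ mx then now + 1 else mn

-- the while-True loop; the fuel argument is a totality guard only (the proof shows the
-- loop meets within (inner_max+1)*(outer_max+1) steps on every input admitted by Pre_)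
def spinLoop (inner_max outer_max : Int) : Nat → Int → Int → Int → Int
  | 0, _, _, action => action
  | fuel+1, inner, outer, action =>
    let inner' := decrementStay inner 0 inner_max
    let outer' := incrementStay outer 0 outer_max
    if inner' = outer' then action + 1
    else spinLoop inner_max outer_max fuel inner' outer' (action + 1)

def spinning_rings (inner_max : Int) (outer_max : Int) : Int :=
  spinLoop inner_max outer_max ((inner_max + 1) * (outer_max + 1)).toNat 0 0 0

-- ===== PORT B =====
-- extended Euclid: egcd a b = (g, x, y) with a*x + b*y = g = gcd a b (for a, b ≥ 0)
def egcd (a b : Int) : Int × Int × Int :=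
  if h : b = 0 then (a, 1, 0)
  else
    let r := egcd b (PySem.Int.mod a b)
    (r.1, r.2.2, r.2.1 - (PySem.Int.floordiv a b) * r.2.2)
termination_by b.natAbs
decreasing_by
  have h1 := PySem.Int.mod_nonneg a (b := b)
  have h2 := PySem.Int.mod_lt a (b := b)
  have h3 := PySem.Int.mod_neg_bounds a (b := b)
  rcases lt_trichotomy b 0 with hb | hb | hb
  · have := h3 hb; omega
  · exact absurd hb h
  · have := h1 hb; have := h2 hb; omega

def spinning_rings_alt (inner_max : Int) (outer_max : Int) : Int :=
  let M := inner_max + 1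
  let N := outer_max + 1
  let e := egcd M N
  let g := e.1
  let x := e.2.1
  let L := (PySem.Int.floordiv M g) * N
  (PySem.List.pyRange 1 (min M N) 1).foldl
    (fun best v =>
      if PySem.Int.mod (2 * v) g = 0 then
        let k := PySem.Int.mod ((PySem.Int.floordiv (2 * v) g) * x) (PySem.Int.floordiv N g)
        let t := PySem.Int.mod (M * k - v) L
        min best (if t = 0 then L else t)
      else best) L

-- ===== PRECONDITION & SPEC =====
-- Pre_ restricts to the function's natural domain, nonnegative ring maxima: for
-- inner_max < 0 A's while loop never terminates (the inner ring jumps to the negative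
-- value inner_max and the outer ring never leaves [0, ∞)), and for outer_max < 0 — a
-- negative number of ring positions — A's returned value is an accident of its frozen
-- outer ring, a corner no caller of the kata would specify.
def Pre_spinning_rings (inner_max : Int) (outer_max : Int) : Prop :=
  0 ≤ inner_max ∧ 0 ≤ outer_max
instance (inner_max : Int) (outer_max : Int) : Decidable (Pre_spinning_rings inner_max outer_max) := by unfold Pre_spinning_rings; infer_instance

def pvWitness_spinning_rings : Int × Int := (2, 3)

def Spec_spinning_rings (inner_max : Int) (outer_max : Int) (out : Int) : Prop := out = spinning_rings_alt inner_max outer_max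
instance (inner_max : Int) (outer_max : Int) (out : Int) : Decidable (Spec_spinning_rings inner_max outer_max out) := by unfold Spec_spinning_rings; infer_instance

-- ===== CLAIM (what is proved, stated in full; the proofs are below) =====
def Claim_equal_spinning_rings : Prop := ∀ (inner_max : Int) (outer_max : Int), Dom_spinning_rings inner_max outer_max → Pre_spinning_rings inner_max outer_max → Spec_spinning_rings inner_max outer_max (spinning_rings inner_max outer_max)

-- ===== LEMMAS AND PROOFS =====

-- ring periods: the inner ring has M = inner_max+1 positions, the outer N = outer_max+1
def Mv (i : Int) : Int := i + 1
def Nv (o : Int) : Int := o + 1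

-- after t steps the inner ring sits at (-t) % M and the outer at t % N; PredP i o t = they meet at step t
def PredP (i o t : Int) : Prop := (-t) % (Mv i) = t % (Nv o)

lemma Mv_pos (i : Int) (hi : 0 ≤ i) : 0 < Mv i := by unfold Mv; omega
lemma Nv_pos (o : Int) (ho : 0 ≤ o) : 0 < Nv o := by unfold Nv; omega

lemma dec_step (i : Int) (hi : 0 ≤ i) (t : Int) :
    decrementStay ((-t) % Mv i) 0 i = (-(t+1)) % Mv i := by
  have hM : 0 < Mv i := by unfold Mv; omega
  have hr0 : 0 ≤ (-t) % Mv i := Int.emod_nonneg _ (by omega)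
  have hrM : (-t) % Mv i < Mv i := Int.emod_lt_of_pos _ hM
  have hdiv := Int.ediv_add_emod (-t) (Mv i)
  have key : (-(t+1)) % Mv i = ((-t) % Mv i - 1) % Mv i := by
    have h2 : -(t+1) = ((-t) % Mv i - 1) + Mv i * ((-t) / Mv i) := by omega
    rw [h2, Int.add_mul_emod_self_left]
  unfold decrementStay
  split_ifs with h
  · have h3 : ((-t) % Mv i - 1) % Mv i = (-t) % Mv i - 1 :=
      Int.emod_eq_of_lt (by omega) (by omega)
    rw [key, h3]
  · have hr : (-t) % Mv i = 0 := by omega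
    rw [key, hr]
    have h2 : (0 - 1 : Int) = (Mv i - 1) + Mv i * (-1) := by ring
    have h3 : (Mv i - 1) % Mv i = Mv i - 1 := Int.emod_eq_of_lt (by omega) (by omega)
    rw [h2, Int.add_mul_emod_self_left, h3]
    unfold Mv; omega

lemma inc_step (o : Int) (ho : 0 ≤ o) (t : Int) :
    incrementStay (t % Nv o) 0 o = (t+1) % Nv o := by
  unfold Nv
  have hN : (0:Int) < o + 1 := by omega
  have hr0 : 0 ≤ t % (o+1) := Int.emod_nonneg _ (by omega)
  have hrM : t % (o+1) < o + 1 := Int.emod_lt_of_pos _ hN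
  have hdiv := Int.ediv_add_emod t (o+1)
  have key : (t+1) % (o+1) = (t % (o+1) + 1) % (o+1) := by
    have h2 : t + 1 = (t % (o+1) + 1) + (o+1) * (t / (o+1)) := by omega
    rw [h2, Int.add_mul_emod_self_left]
  unfold incrementStay
  split_ifs with h
  · have h3 : (t % (o+1) + 1) % (o+1) = t % (o+1) + 1 :=
      Int.emod_eq_of_lt (by omega) (by omega)
    rw [key, h3]
  · have hr : t % (o+1) = o := by omega
    rw [key, hr]
    simp

lemma spinLoop_eq (i o : Int) (hi : 0 ≤ i) (ho : 0 ≤ o) :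
    ∀ (fuel : Nat) (t s : Int), 0 ≤ t → t < s → PredP i o s →
      (∀ u, t < u → u < s → ¬ PredP i o u) → s - t ≤ (fuel : Int) →
      spinLoop i o fuel ((-t) % Mv i) (t % Nv o) t = s := by
  intro fuel
  induction fuel with
  | zero => intro t s ht hts hs hmin hf; simp at hf; omega
  | succ fuel IH =>
    intro t s ht hts hs hmin hf
    rw [spinLoop]
    simp only [dec_step i hi t, inc_step o ho t]
    by_cases hp : (-(t+1)) % Mv i = (t+1) % Nv o
    · have hst : s = t + 1 := by
        by_contra hne
        exact hmin (t+1) (by omega) (by omega) hp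
      rw [if_pos hp, hst]
    · rw [if_neg hp]
      have hp' : ¬ PredP i o (t+1) := hp
      have hts' : t + 1 < s := by
        rcases lt_or_eq_of_le (by omega : t + 1 ≤ s) with h | h
        · exact h
        · exact absurd (h ▸ hs) hp'
      exact IH (t+1) s (by omega) hts' hs (fun u hu1 hu2 => hmin u (by omega) hu2) (by push_cast; omega)

lemma predP_dvd (i o t : Int) (h1 : Mv i ∣ t) (h2 : Nv o ∣ t) : PredP i o t := by
  unfold PredP
  rw [Int.emod_eq_zero_of_dvd h2, Int.emod_eq_zero_of_dvd (dvd_neg.mpr h1)]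

lemma predP_mul (i o : Int) : PredP i o (Mv i * Nv o) :=
  predP_dvd i o _ ⟨Nv o, rfl⟩ ⟨Mv i, mul_comm _ _⟩

lemma A_eq (i o : Int) (hi : 0 ≤ i) (ho : 0 ≤ o) (s : Int) (h1 : 1 ≤ s) (hs : PredP i o s)
    (hmin : ∀ u, 1 ≤ u → u < s → ¬ PredP i o u) :
    spinning_rings i o = s := by
  have hM := Mv_pos i hi
  have hN := Nv_pos o ho
  have hK : 1 ≤ Mv i * Nv o := by have := mul_pos hM hN; omega
  have hsK : s ≤ Mv i * Nv o := by
    by_contra h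
    exact hmin (Mv i * Nv o) hK (by omega) (predP_mul i o)
  have hfuel : ((((i + 1) * (o + 1)).toNat : Nat) : Int) = Mv i * Nv o := by
    rw [Int.toNat_of_nonneg (by unfold Mv Nv at hK; omega)]
    rfl
  have h0a : (0 : Int) = (-(0:Int)) % Mv i := by simp
  have h0b : (0 : Int) = (0:Int) % Nv o := by simp
  unfold spinning_rings
  calc spinLoop i o ((i + 1) * (o + 1)).toNat 0 0 0
      = spinLoop i o _ ((-(0:Int)) % Mv i) ((0:Int) % Nv o) 0 := by rw [← h0a, ← h0b]
    _ = s := spinLoop_eq i o hi ho _ 0 s le_rfl (by omega) hs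
        (fun u hu1 hu2 => hmin u (by omega) hu2) (by rw [hfuel]; omega)

lemma exists_least (i o : Int) (hi : 0 ≤ i) (ho : 0 ≤ o) :
    ∃ s : Int, 1 ≤ s ∧ PredP i o s ∧ ∀ u, 1 ≤ u → u < s → ¬ PredP i o u := by
  have hM := Mv_pos i hi
  have hN := Nv_pos o ho
  have hK : 1 ≤ Mv i * Nv o := by have := mul_pos hM hN; omega
  haveI : DecidablePred (fun n : Nat => PredP i o ((n : Int) + 1)) :=
    fun n => by unfold PredP; infer_instance
  have hex : ∃ n : Nat, PredP i o ((n : Int) + 1) :=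
    ⟨(Mv i * Nv o - 1).toNat, by
      have : (((Mv i * Nv o - 1).toNat : Nat) : Int) + 1 = Mv i * Nv o := by
        rw [Int.toNat_of_nonneg (by omega)]; ring
      rw [this]; exact predP_mul i o⟩
  refine ⟨(Nat.find hex : Int) + 1, by omega, Nat.find_spec hex, ?_⟩
  intro u hu1 hu2 hp
  have hlt : (u - 1).toNat < Nat.find hex := by omega
  exact Nat.find_min hex hlt (by
    have : (((u - 1).toNat : Nat) : Int) + 1 = u := by omega
    rw [this]; exact hp)

lemma egcd_spec : ∀ (n : Nat) (a b : Int), b.natAbs = n → 0 ≤ a → 0 ≤ b →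
    a * (egcd a b).2.1 + b * (egcd a b).2.2 = (egcd a b).1 ∧ (egcd a b).1 = (Int.gcd a b : Int) := by
  intro n
  induction n using Nat.strong_induction_on with
  | _ n IH =>
    intro a b hn ha hb
    by_cases hb0 : b = 0
    · subst hb0
      rw [egcd]
      simp [Int.natAbs_of_nonneg ha]
    · have hbpos : 0 < b := by omega
      have hmod : PySem.Int.mod a b = a % b := PySem.Int.mod_eq_emod_of_pos hbpos
      have hdivq : PySem.Int.floordiv a b = a / b := PySem.Int.floordiv_eq_ediv_of_pos hbpos
      have hrn : (a % b).natAbs < n := by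
        have h1 : 0 ≤ a % b := Int.emod_nonneg a hb0
        have h2 : a % b < b := Int.emod_lt_of_pos a hbpos
        omega
      obtain ⟨ihx, ihg⟩ := IH (a % b).natAbs hrn b (a % b) rfl hb (Int.emod_nonneg a hb0)
      rw [egcd]
      rw [dif_neg hb0]
      simp only [hmod, hdivq]
      constructor
      · have hemod : a % b = a - b * (a / b) := Int.emod_def a b
        calc a * (egcd b (a % b)).2.2 + b * ((egcd b (a % b)).2.1 - a / b * (egcd b (a % b)).2.2)
            = b * (egcd b (a % b)).2.1 + (a - b * (a / b)) * (egcd b (a % b)).2.2 := by ring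
          _ = b * (egcd b (a % b)).2.1 + (a % b) * (egcd b (a % b)).2.2 := by rw [← hemod]
          _ = (egcd b (a % b)).1 := ihx
      · rw [ihg]
        congr 1
        have : a % b = a + b * (-(a / b)) := by
          rw [Int.emod_def]; ring
        rw [this, Int.gcd_add_mul_left_right, Int.gcd_comm]

-- a % M = v when v is the canonical representative
lemma emod_eq_of_dvd_sub (a v M : Int) (h0 : 0 ≤ v) (hvM : v < M) (hd : M ∣ a - v) :
    a % M = v := by
  obtain ⟨q, hq⟩ := hd
  have ha : a = v + M * q := by omega
  rw [ha, Int.add_mul_emod_self_left, Int.emod_eq_of_lt h0 hvM]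

lemma pred_iff (i o : Int) (hi : 0 ≤ i) (ho : 0 ≤ o) (t : Int) :
    PredP i o t ↔ ∃ v, 0 ≤ v ∧ v < Mv i ∧ v < Nv o ∧ (Mv i ∣ t + v) ∧ (Nv o ∣ t - v) := by
  have hM := Mv_pos i hi
  have hN := Nv_pos o ho
  constructor
  · intro hp
    refine ⟨t % Nv o, Int.emod_nonneg t (by omega), ?_, Int.emod_lt_of_pos t hN, ?_, ?_⟩
    · rw [← hp]; exact Int.emod_lt_of_pos _ hM
    · have : Mv i ∣ (-t) - t % Nv o := by
        rw [← hp]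
        have := Int.emod_def (-t) (Mv i)
        exact ⟨(-t) / Mv i, by omega⟩
      obtain ⟨q, hq⟩ := this
      exact ⟨-q, by rw [mul_neg]; omega⟩
    · exact ⟨t / Nv o, by have := Int.emod_def t (Nv o); omega⟩
  · rintro ⟨v, h0, hvM, hvN, hdM, hdN⟩
    unfold PredP
    rw [emod_eq_of_dvd_sub (-t) v (Mv i) h0 hvM (by obtain ⟨q, hq⟩ := hdM; exact ⟨-q, by rw [mul_neg]; omega⟩),
        emod_eq_of_dvd_sub t v (Nv o) h0 hvN hdN]

-- generic lemmas about the conditional-min fold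
lemma foldl_min_le_init (c : Int → Prop) [DecidablePred c] (f : Int → Int) :
    ∀ (l : List Int) (best : Int),
      l.foldl (fun b v => if c v then min b (f v) else b) best ≤ best := by
  intro l
  induction l with
  | nil => intro best; simp
  | cons hd tl IH =>
    intro best
    simp only [List.foldl_cons]
    refine le_trans (IH _) ?_
    split
    · exact min_le_left _ _
    · exact le_rfl

lemma foldl_min_le_mem (c : Int → Prop) [DecidablePred c] (f : Int → Int) :
    ∀ (l : List Int) (best v : Int), v ∈ l → c v →
      l.foldl (fun b v => if c v then min b (f v) else b) best ≤ f v := by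
  intro l
  induction l with
  | nil => intro best v hv; simp at hv
  | cons hd tl IH =>
    intro best v hv hc
    simp only [List.foldl_cons]
    rcases List.mem_cons.mp hv with h | h
    · subst h
      refine le_trans (foldl_min_le_init c f tl _) ?_
      rw [if_pos hc]
      exact min_le_right _ _
    · exact IH _ v h hc

lemma foldl_min_cases (c : Int → Prop) [DecidablePred c] (f : Int → Int) :
    ∀ (l : List Int) (best : Int),
      l.foldl (fun b v => if c v then min b (f v) else b) best = best ∨
      ∃ v ∈ l, c v ∧ l.foldl (fun b v => if c v then min b (f v) else b) best = f v := by
  intro l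
  induction l with
  | nil => intro best; left; rfl
  | cons hd tl IH =>
    intro best
    simp only [List.foldl_cons]
    rcases IH (if c hd then min best (f hd) else best) with h | ⟨v, hv, hc, h⟩
    · rw [h]
      split_ifs at h ⊢ with hchd
      · rcases min_cases best (f hd) with ⟨hm, _⟩ | ⟨hm, _⟩
        · left; exact hm
        · right; exact ⟨hd, List.mem_cons_self, hchd, hm⟩
      · left; rfl
    · right; exact ⟨v, List.mem_cons_of_mem _ hv, hc, h⟩

lemma B_eq (i o : Int) (hi : 0 ≤ i) (ho : 0 ≤ o) (s : Int) (h1 : 1 ≤ s) (hs : PredP i o s)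
    (hmin : ∀ u, 1 ≤ u → u < s → ¬ PredP i o u) :
    spinning_rings_alt i o = s := by
  have hM : (0:Int) < i + 1 := by omega
  have hN : (0:Int) < o + 1 := by omega
  simp only [spinning_rings_alt]
  set N : Int := o + 1 with hNdef
  obtain ⟨hxy, hgdef⟩ := egcd_spec N.natAbs (i+1) N rfl (by omega) (by omega)
  set g : Int := (egcd (i+1) N).1 with hgd
  set x : Int := (egcd (i+1) N).2.1 with hxd
  set y : Int := (egcd (i+1) N).2.2 with hyd
  have hgpos : 0 < g := by
    rw [hgdef]
    have : 0 < Int.gcd (i+1) N := Int.gcd_pos_iff.mpr (Or.inl (by omega))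
    exact_mod_cast this
  have hgM : g ∣ (i+1) := by rw [hgdef]; exact Int.gcd_dvd_left _ _
  have hgN : g ∣ N := by rw [hgdef]; exact Int.gcd_dvd_right _ _
  have hMg : (i+1) / g * g = i + 1 := Int.ediv_mul_cancel hgM
  have hNg : N / g * g = N := Int.ediv_mul_cancel hgN
  -- rewrite the port into pure % / ediv form
  simp only [PySem.Int.floordiv_eq_ediv_of_pos hgpos, PySem.Int.mod_eq_emod_of_pos hgpos]
  set m' : Int := (i+1) / g with hm'd
  set n' : Int := N / g with hn'd
  have hm'pos : 0 < m' := by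
    by_contra h
    push_neg at h
    have := mul_nonpos_of_nonpos_of_nonneg h (le_of_lt hgpos); omega
  have hn'pos : 0 < n' := by
    by_contra h
    push_neg at h
    have := mul_nonpos_of_nonpos_of_nonneg h (le_of_lt hgpos); omega
  have hLpos : 0 < m' * N := mul_pos hm'pos hN
  simp only [PySem.Int.mod_eq_emod_of_pos hn'pos, PySem.Int.mod_eq_emod_of_pos hLpos]
  have hMdvdL : (i+1) ∣ m' * N := ⟨n', by rw [← hMg, ← hNg]; ring⟩
  have hNdvdL : N ∣ m' * N := ⟨m', mul_comm _ _⟩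
  have hLlcm : m' * N = (Int.lcm (i+1) N : Int) := by
    have hcast : (g : Int) * (Int.lcm (i+1) N : Int) = (i+1) * N := by
      have h2 := Int.gcd_mul_lcm (i+1) N
      have h3 : ((Int.gcd (i+1) N : Nat) : Int) * ((Int.lcm (i+1) N : Nat) : Int)
          = ((i+1).natAbs : Int) * (N.natAbs : Int) := by exact_mod_cast h2
      rw [Int.natAbs_of_nonneg (by omega : (0:Int) ≤ i + 1),
          Int.natAbs_of_nonneg (le_of_lt hN)] at h3
      rw [hgdef]
      exact h3
    have h4 : (m' * N) * g = (Int.lcm (i+1) N : Int) * g := by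
      rw [mul_comm (Int.lcm (i+1) N : Int) g, hcast, ← hMg]; ring
    exact mul_right_cancel₀ (ne_of_gt hgpos) h4
  have hLdvd : ∀ w : Int, (i+1) ∣ w → N ∣ w → (m' * N) ∣ w := by
    intro w hw1 hw2
    rw [hLlcm]
    exact Int.coe_lcm_dvd hw1 hw2
  -- the per-candidate minimum and its properties
  set f : Int → Int := fun v =>
    if ((i+1) * ((2 * v / g * x) % n') - v) % (m' * N) = 0 then m' * N
    else ((i+1) * ((2 * v / g * x) % n') - v) % (m' * N) with hfd
  have tv_spec : ∀ v : Int, 0 ≤ v → v < i + 1 → v < N → g ∣ 2 * v →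
      1 ≤ f v ∧ ((i+1) ∣ f v + v) ∧ (N ∣ f v - v) ∧
      (∀ w, 1 ≤ w → (i+1) ∣ w + v → N ∣ w - v → f v ≤ w) := by
    intro v h0 hvM hvN hsol
    set c : Int := 2 * v / g * x with hcd
    set t0 : Int := ((i+1) * (c % n') - v) % (m' * N) with ht0d
    have ht00 : 0 ≤ t0 := Int.emod_nonneg _ (ne_of_gt hLpos)
    have ht0L : t0 < m' * N := Int.emod_lt_of_pos _ hLpos
    have hq := Int.emod_def ((i+1) * (c % n') - v) (m' * N)
    have hk := Int.emod_def c n'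
    -- N divides (i+1) * (c % n') - 2v
    have hNmid : N ∣ (i+1) * (c % n') - 2 * v := by
      have h5 : (i+1) * c - 2 * v = N * (-(2 * v / g * y)) := by
        have h6 : 2 * v / g * g = 2 * v := Int.ediv_mul_cancel hsol
        calc (i+1) * c - 2 * v = (2 * v / g) * ((i+1) * x) - 2 * v := by rw [hcd]; ring
          _ = (2 * v / g) * (g - N * y) - 2 * v := by
              have : (i+1) * x = g - N * y := by linarith [hxy]
              rw [this]
          _ = (2 * v / g * g) - 2 * v - N * (2 * v / g * y) := by ring
          _ = N * (-(2 * v / g * y)) := by rw [h6]; ring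
      have h7 : (i+1) * (c % n') - 2 * v
          = ((i+1) * c - 2 * v) - (m' * N) * (c / n') := by
        rw [hk]
        have h8 : (i+1) * n' = m' * N := by rw [← hMg, ← hNg]; ring
        calc (i+1) * (c - n' * (c / n')) - 2 * v
            = ((i+1) * c - 2 * v) - ((i+1) * n') * (c / n') := by ring
          _ = ((i+1) * c - 2 * v) - (m' * N) * (c / n') := by rw [h8]
      rw [h7, h5]
      exact dvd_sub (Dvd.intro _ rfl) ((hNdvdL).mul_right _)
    have hMt0 : (i+1) ∣ t0 + v := by
      have h9 : t0 + v = (i+1) * (c % n') - (m' * N) * (((i+1) * (c % n') - v) / (m' * N)) := by omega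
      rw [h9]
      exact dvd_sub (Dvd.intro _ rfl) (hMdvdL.mul_right _)
    have hNt0 : N ∣ t0 - v := by
      have h9 : t0 - v = ((i+1) * (c % n') - 2 * v) - (m' * N) * (((i+1) * (c % n') - v) / (m' * N)) := by omega
      rw [h9]
      exact dvd_sub hNmid (hNdvdL.mul_right _)
    have hfv : f v = if t0 = 0 then m' * N else t0 := rfl
    by_cases ht0 : t0 = 0
    · rw [hfv, if_pos ht0]
      refine ⟨by omega, ?_, ?_, ?_⟩
      · exact dvd_add hMdvdL (by rw [ht0] at hMt0; simpa using hMt0)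
      · exact dvd_sub hNdvdL (by rw [ht0] at hNt0; simpa using hNt0)
      · intro w hw1 hwM hwN
        have hdw : (m' * N) ∣ w - t0 := by
          apply hLdvd
          · have := Int.dvd_sub hwM hMt0; simpa using this
          · have := Int.dvd_sub hwN hNt0; simpa using this
        rw [ht0] at hdw
        simp only [sub_zero] at hdw
        exact Int.le_of_dvd (by omega) hdw
    · rw [hfv, if_neg ht0]
      refine ⟨by omega, hMt0, hNt0, ?_⟩
      intro w hw1 hwM hwN
      have hdw : (m' * N) ∣ w - t0 := by
        apply hLdvd
        · have := Int.dvd_sub hwM hMt0; simpa using this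
        · have := Int.dvd_sub hwN hNt0; simpa using this
      obtain ⟨m, hm⟩ := hdw
      by_cases hm0 : 0 ≤ m
      · have := mul_nonneg (le_of_lt hLpos) hm0; omega
      · push_neg at hm0
        have h10 : m' * N * m ≤ m' * N * (-1) :=
          mul_le_mul_of_nonneg_left (by omega) (le_of_lt hLpos)
        have h11 : m' * N * (-1) = -(m' * N) := by ring
        omega
  -- predicate at candidate values
  have predN : ∀ t : Int, 1 ≤ t → ((i+1) ∣ t) → (N ∣ t) → PredP i o t := by
    intro t ht hdM hdN
    rw [pred_iff i o hi ho t]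
    exact ⟨0, le_rfl, by unfold Mv; omega, by unfold Nv; omega,
      by simpa using hdM, by simpa using hdN⟩
  -- upper bound: the fold result is ≤ s (s's own meeting position is a candidate)
  have hfold_le_s : (PySem.List.pyRange 1 (min (i+1) N) 1).foldl
      (fun b v => if (2 * v) % g = 0 then min b (f v) else b) (m' * N) ≤ s := by
    obtain ⟨w, h0w, hwM, hwN, hdMw, hdNw⟩ := (pred_iff i o hi ho s).mp hs
    simp only [Mv, Nv, ← hNdef] at hwM hwN
    by_cases hw0 : w = 0
    · subst hw0
      have hLs : (m' * N) ∣ s := hLdvd s (by simpa using hdMw) (by simpa using hdNw)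
      have h12 := Int.le_of_dvd (by omega) hLs
      exact le_trans (foldl_min_le_init _ f _ _) h12
    · have hsol : g ∣ 2 * w := by
        have d1 : g ∣ s + w := dvd_trans hgM hdMw
        have d2 : g ∣ s - w := dvd_trans hgN hdNw
        have := Int.dvd_sub d1 d2
        simpa [show s + w - (s - w) = 2 * w by ring] using this
      have hcw : (2 * w) % g = 0 := Int.emod_eq_zero_of_dvd hsol
      have hmem : w ∈ PySem.List.pyRange 1 (min (i+1) N) 1 :=
        PySem.List.mem_pyRange_one.mpr ⟨by omega, lt_min hwM hwN⟩
      obtain ⟨_, _, _, htwmin⟩ := tv_spec w h0w hwM hwN hsol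
      exact le_trans (foldl_min_le_mem _ f _ _ w hmem hcw) (htwmin s h1 hdMw hdNw)
  -- split the fold
  rcases foldl_min_cases (fun v => (2 * v) % g = 0) f (PySem.List.pyRange 1 (min (i+1) N) 1) (m' * N)
    with hR | ⟨v, hvmem, hvc, hR⟩
  · rw [hR]
    rw [hR] at hfold_le_s
    -- result is L itself: L satisfies the predicate, so s ≤ L; the fold bound gives L ≤ s
    have hpredL : PredP i o (m' * N) := predN _ (by omega) hMdvdL hNdvdL
    have hsL : s ≤ m' * N := by
      by_contra hcon
      exact hmin (m' * N) (by omega) (by omega) hpredL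
    omega
  · rw [hR]
    -- result is f v for an in-range solvable v
    have hvr := PySem.List.mem_pyRange_one.mp hvmem
    have hvM : v < i + 1 := lt_of_lt_of_le hvr.2 (min_le_left _ _)
    have hvN : v < N := lt_of_lt_of_le hvr.2 (min_le_right _ _)
    have hsol : g ∣ 2 * v := Int.dvd_of_emod_eq_zero hvc
    obtain ⟨htv1, htvM, htvN, htvmin⟩ := tv_spec v (by omega) hvM hvN hsol
    have hpred : PredP i o (f v) := by
      rw [pred_iff i o hi ho (f v)]
      exact ⟨v, by omega, by unfold Mv; omega, by unfold Nv; omega, htvM, htvN⟩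
    have hle : s ≤ f v := by
      by_contra hcon
      exact hmin (f v) htv1 (by omega) hpred
    rw [hR] at hfold_le_s
    omega


-- ===== VERDICT (by name: the statement is the Claim_ definition above) =====
theorem spinning_rings_spec : Claim_equal_spinning_rings := by
  intro i o _ hPre
  obtain ⟨hi, ho⟩ := hPre
  unfold Spec_spinning_rings
  obtain ⟨s, h1, hs, hmin⟩ := exists_least i o hi ho
  rw [A_eq i o hi ho s h1 hs hmin, B_eq i o hi ho s h1 hs hmin]
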